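-- pv_equiv track=rewrite | github.com/quagntam09/DoAnXuLiAnh2025 | algorithms/multiresolution.py | level_sizes
-- ===== SOURCE A (Python) =====
-- from typing import Callable, List, Tuple
--
-- def level_sizes(base_tile: int, levels: int = 3) -> List[int]:
--     if base_tile <= 0:
--         raise ValueError("base_tile phải > 0")
--     if levels <= 0:
--         raise ValueError("levels phải > 0")
--
--     sizes = []
--     # Level đầu tiên tile to nhất -> Mosaic thô nhất
--     s = base_tile * (2 ** (levels - 1))
--     for _ in range(levels):
--         sizes.append(int(s))
--         s //= 2
--         if s < base_tile:
--             break
--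
--     # Đảm bảo level cuối cùng chính xác là base_tile
--     if sizes[-1] != base_tile:
--         sizes.append(base_tile)
--
--     # Loại bỏ trùng lặp và sort giảm dần
--     sizes = sorted(list(set(sizes)), reverse=True)
--     return sizes
-- ===== SOURCE B (Python) =====
-- def level_sizes(base_tile: int, levels: int = 3):
--     if base_tile <= 0:
--         raise ValueError("base_tile phải > 0")
--     if levels <= 0:
--         raise ValueError("levels phải > 0")
--     return [base_tile << i for i in range(levels - 1, -1, -1)]
-- ===== Notes on version B (the rewrite author's own statement) =====
-- stated objective: simpler
-- what changed: B returns the descending geometric sequence directly as a closed-form comprehension [base_tile << i for i in range(levels-1,-1,-1)], dropping A's halving loop with break, the ensure-last append and the set+sort normalization (all no-ops since the values are distinct and already descending); shifting avoids A's big-int power and division work.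
import Mathlib
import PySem

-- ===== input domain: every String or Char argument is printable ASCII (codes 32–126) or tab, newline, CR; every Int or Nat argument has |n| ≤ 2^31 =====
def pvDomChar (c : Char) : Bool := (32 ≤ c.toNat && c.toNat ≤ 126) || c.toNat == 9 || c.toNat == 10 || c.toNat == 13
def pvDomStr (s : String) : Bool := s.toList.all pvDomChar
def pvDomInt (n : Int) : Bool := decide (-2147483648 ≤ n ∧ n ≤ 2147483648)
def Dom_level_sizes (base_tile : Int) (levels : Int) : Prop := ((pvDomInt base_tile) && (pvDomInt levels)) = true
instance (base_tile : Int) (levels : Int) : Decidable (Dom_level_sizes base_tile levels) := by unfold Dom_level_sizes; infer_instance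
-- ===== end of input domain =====

-- B replaces A's halving loop + break + ensure-last append + set/sort normalization by the
-- direct descending comprehension [base_tile * 2**i for i in range(levels-1,-1,-1)] (simpler).
-- Both guards raise for base_tile ≤ 0 or levels ≤ 0; those inputs are excluded by Pre_.

-- ===== PORT A =====
-- A's 'for _ in range(levels)' loop with its break, transliterated as fuel recursion on
-- levels.toNat with the same state (s, sizes).
def lsLoopA (base_tile : Int) : Nat → Int → List Int → List Int
  | 0, _, sizes => sizes
  | fuel + 1, s, sizes =>
    let sizes := sizes ++ [s]
    let s := PySem.Int.floordiv s 2
    if s < base_tile then sizes else lsLoopA base_tile fuel s sizes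

def level_sizes (base_tile : Int) (levels : Int) : List Int :=
  -- 2 ** (levels - 1): under Pre_ levels ≥ 1, so (levels-1).toNat is exact
  let s := base_tile * 2 ^ (levels - 1).toNat
  let sizes := lsLoopA base_tile levels.toNat s []
  match PySem.List.pyGet? sizes (-1) with
  | none => []  -- sizes[-1] IndexError (unreachable under Pre_)
  | some last =>
    let sizes := if last ≠ base_tile then sizes ++ [base_tile] else sizes
    PySem.List.sorted (PySem.Set.ofList sizes) (fun x => x) true

-- ===== PORT B =====
def level_sizes_alt (base_tile : Int) (levels : Int) : List Int :=
  -- i ranges over levels-1 … 0, so i ≥ 0 and Python's 'base_tile << i' is 'base_tile <<< i.toNat'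
  (PySem.List.pyRange (levels - 1) (-1) (-1)).map (fun i => base_tile <<< i.toNat)

-- ===== PRECONDITION & SPEC =====
-- Pre_ excludes exactly the inputs where A raises ValueError (base_tile ≤ 0 or levels ≤ 0).
def Pre_level_sizes (base_tile : Int) (levels : Int) : Prop := 0 < base_tile ∧ 0 < levels
instance (base_tile : Int) (levels : Int) : Decidable (Pre_level_sizes base_tile levels) := by
  unfold Pre_level_sizes; infer_instance

def pvWitness_level_sizes : Int × Int := (16, 3)

def Spec_level_sizes (base_tile : Int) (levels : Int) (out : List Int) : Prop :=
  out = level_sizes_alt base_tile levels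
instance (base_tile : Int) (levels : Int) (out : List Int) :
    Decidable (Spec_level_sizes base_tile levels out) := by unfold Spec_level_sizes; infer_instance

-- ===== CLAIM (what is proved, stated in full; the proofs are below) =====
def Claim_equal_level_sizes : Prop :=
  ∀ (base_tile : Int) (levels : Int), Dom_level_sizes base_tile levels →
    Pre_level_sizes base_tile levels →
    Spec_level_sizes base_tile levels (level_sizes base_tile levels)

-- ===== LEMMAS AND PROOFS =====

-- the intended descending sequence, as a map over Nat range
def descSeq (b : Int) (n : Nat) : List Int :=
  (List.range n).map (fun j => b * 2 ^ (n - 1 - j))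

-- A's loop, started at b * 2^k with enough fuel, produces acc ++ descSeq b (k+1)
theorem lsLoopA_eq (b : Int) (hb : 0 < b) :
    ∀ (k fuel : Nat), k + 1 ≤ fuel → ∀ (acc : List Int),
      lsLoopA b fuel (b * 2 ^ k) acc = acc ++ descSeq b (k + 1) := by
  intro k
  induction k with
  | zero =>
    intro fuel hf acc
    obtain ⟨m, rfl⟩ : ∃ m, fuel = m + 1 := ⟨fuel - 1, by omega⟩
    simp only [lsLoopA, pow_zero, mul_one]
    rw [PySem.Int.floordiv_eq_ediv_of_pos (by omega), if_pos (by omega)]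
    simp [descSeq]
  | succ k ih =>
    intro fuel hf acc
    obtain ⟨m, rfl⟩ : ∃ m, fuel = m + 1 := ⟨fuel - 1, by omega⟩
    simp only [lsLoopA]
    have hdiv : PySem.Int.floordiv (b * 2 ^ (k + 1)) 2 = b * 2 ^ k := by
      rw [PySem.Int.floordiv_eq_ediv_of_pos (by omega), pow_succ, ← mul_assoc]
      exact Int.mul_ediv_cancel _ (by omega)
    have h2 : (1:Int) ≤ 2 ^ k := one_le_pow₀ (by omega)
    rw [hdiv, if_neg (by simp only [not_lt]; nlinarith), ih m (by omega)]
    have hstep : descSeq b (k + 1 + 1) = b * 2 ^ (k + 1) :: descSeq b (k + 1) := by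
      unfold descSeq
      rw [List.range_succ_eq_map, List.map_cons, List.map_map]
      congr 1
      apply List.map_congr_left
      intro j _
      simp only [Function.comp_apply]
      have hje : k + 1 + 1 - 1 - j.succ = k + 1 - 1 - j := by omega
      rw [hje]
    rw [hstep]
    simp

theorem descSeq_pairwise_gt (b : Int) (hb : 0 < b) (n : Nat) :
    (descSeq b n).Pairwise (fun a c => c < a) := by
  unfold descSeq
  rw [List.pairwise_map]
  apply List.Pairwise.imp_of_mem (l := List.range n)
    (R := fun i j => i < j)
  · intro i j hi hj hij
    simp only [List.mem_range] at hi hj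
    have : (2:Int) ^ (n - 1 - j) < 2 ^ (n - 1 - i) :=
      pow_lt_pow_right₀ (by omega) (by omega)
    nlinarith
  · exact List.pairwise_lt_range

theorem descSeq_nodup (b : Int) (hb : 0 < b) (n : Nat) : (descSeq b n).Nodup := by
  have h := descSeq_pairwise_gt b hb n
  exact h.imp (fun hlt => by omega) |>.nodup

theorem level_sizes_eq_descSeq (b lv : Int) (hb : 0 < b) (hl : 0 < lv) :
    level_sizes b lv = descSeq b lv.toNat := by
  have hn : lv.toNat = (lv.toNat - 1) + 1 := by omega
  have hexp : (lv - 1).toNat = lv.toNat - 1 := by omega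
  simp only [level_sizes]
  rw [hexp, hn]
  simp only [Nat.add_sub_cancel]
  rw [lsLoopA_eq b hb (lv.toNat - 1) ((lv.toNat - 1) + 1) (by omega) []]
  simp only [List.nil_append]
  have hlast : PySem.List.pyGet? (descSeq b ((lv.toNat - 1) + 1)) (-1) = some b := by
    unfold descSeq
    rw [List.range_succ, List.map_append]
    simp [PySem.List.pyGet?_neg_one_append_singleton]
  rw [hlast]
  dsimp only
  rw [if_neg (by simp)]
  have hset := PySem.Set.ofList_eq_self_of_nodup _ (descSeq_nodup b hb (lv.toNat - 1 + 1))
  rw [hset]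
  exact PySem.List.sorted_rev_eq_of_perm_of_pairwise_gt _ _ _ (List.Perm.refl _)
    (descSeq_pairwise_gt b hb _)

theorem alt_eq_descSeq (b lv : Int) (hl : 0 < lv) :
    level_sizes_alt b lv = descSeq b lv.toNat := by
  unfold level_sizes_alt descSeq
  rw [PySem.List.pyRange_neg_one]
  have h : (lv - 1 - (-1)).toNat = lv.toNat := by omega
  rw [h, List.map_map]
  apply List.map_congr_left
  intro j hj
  simp only [List.mem_range] at hj
  simp only [Function.comp_apply]
  rw [Int.shiftLeft_natCast_right, Int.shiftLeft_eq]
  congr 1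
  congr 1
  omega

-- ===== VERDICT (by name: the statement is the Claim_ definition above) =====
theorem level_sizes_spec : Claim_equal_level_sizes := by
  intro b lv _ hpre
  unfold Spec_level_sizes
  rw [level_sizes_eq_descSeq b lv hpre.1 hpre.2, alt_eq_descSeq b lv hpre.2]
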